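-- pv_equiv track=rewrite | github.com/raul-gomes/curso_python | exercicios/exercicios/exercicio_14_17.py | lado_triangulo
-- ===== SOURCE A (Python) =====
-- def lado_triangulo(lados):
--     for lado in lados:
--         verifica_lado = lados.copy()
--         verifica_lado.remove(lado)
--         if lado <= sum(verifica_lado):
--             e_tringaulo = True
--         else:
--             return False
--     return e_tringaulo
-- ===== SOURCE B (Python) =====
-- def lado_triangulo(lados):
--     total = sum(lados)
--     return all(lado <= total - lado for lado in lados)
-- ===== Notes on version B (the rewrite author's own statement) =====
-- stated objective: simpler
-- what changed: B computes the total sum once and checks each side against total minus itself in one pass, instead of copying the list and summing the remainder for every side.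
import Mathlib
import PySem

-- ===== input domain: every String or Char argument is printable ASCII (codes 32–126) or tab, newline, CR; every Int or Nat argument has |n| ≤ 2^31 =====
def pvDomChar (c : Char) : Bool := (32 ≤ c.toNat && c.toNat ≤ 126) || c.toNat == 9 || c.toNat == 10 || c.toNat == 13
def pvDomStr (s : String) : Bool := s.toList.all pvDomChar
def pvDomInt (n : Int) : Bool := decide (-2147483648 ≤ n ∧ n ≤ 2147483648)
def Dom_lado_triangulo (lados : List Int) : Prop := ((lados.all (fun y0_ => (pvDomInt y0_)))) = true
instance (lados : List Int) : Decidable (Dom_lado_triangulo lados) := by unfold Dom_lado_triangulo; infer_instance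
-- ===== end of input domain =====

-- B: sum once, then check each side against total minus itself in one pass, instead of A's per-side copy+remove+sum (simpler; speed not confirmed).

-- ===== PORT A =====
-- A's loop: for each lado, copy lados, remove the first occurrence of lado,
-- compare lado with the sum of the rest; the flag is only set after a success.
-- The Option Bool accumulator mirrors the possibly-unassigned 'e_tringaulo'
-- (none = unassigned; on the empty list Python raises UnboundLocalError,
-- excluded by Pre_; '.getD false' only fills that excluded case).
def ladoLoopA (lados : List Int) : List Int → Option Bool → Option Bool
  | [], flag => flag
  | lado :: rest, flag =>
      match PySem.List.remove? lados lado with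
      | none => none
      | some verifica =>
          if lado ≤ verifica.sum then ladoLoopA lados rest (some true)
          else some false

def lado_triangulo (lados : List Int) : Bool :=
  (ladoLoopA lados lados none).getD false

-- ===== PORT B =====
def lado_triangulo_alt (lados : List Int) : Bool :=
  let total := lados.sum
  lados.all (fun lado => decide (lado ≤ total - lado))

-- ===== PRECONDITION & SPEC =====
-- Pre_ excludes only the empty list, on which A raises UnboundLocalError.
def Pre_lado_triangulo (lados : List Int) : Prop := lados ≠ []
instance (lados : List Int) : Decidable (Pre_lado_triangulo lados) := by
  unfold Pre_lado_triangulo; infer_instance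
def pvWitness_lado_triangulo : List Int := ([3, 4, 5])

def Spec_lado_triangulo (lados : List Int) (out : Bool) : Prop := out = lado_triangulo_alt lados
instance (lados : List Int) (out : Bool) : Decidable (Spec_lado_triangulo lados out) := by unfold Spec_lado_triangulo; infer_instance

-- ===== CLAIM (what is proved, stated in full; the proofs are below) =====
def Claim_equal_lado_triangulo : Prop := ∀ (lados : List Int), Dom_lado_triangulo lados → Pre_lado_triangulo lados → Spec_lado_triangulo lados (lado_triangulo lados)

-- ===== LEMMAS AND PROOFS =====

theorem ladoLoopA_eq (lados : List Int) :
    ∀ (it : List Int) (flag : Option Bool), (∀ x ∈ it, x ∈ lados) →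
      ladoLoopA lados it flag =
        if it.all (fun l => decide (l ≤ lados.sum - l)) then
          (if it.isEmpty then flag else some true)
        else some false := by
  intro it
  induction it with
  | nil => intro flag _; simp [ladoLoopA]
  | cons lado rest ih =>
    intro flag hmem
    have hlado : lado ∈ lados := hmem lado (by simp)
    have hys := PySem.List.remove?_eq_some_erase lados lado hlado
    have hsum : (lados.erase lado).sum = lados.sum - lado := by
      have h := (List.perm_cons_erase hlado).sum_eq
      simp only [List.sum_cons] at h
      omega
    by_cases hle : lado ≤ lados.sum - lado
    · rw [show ladoLoopA lados (lado :: rest) flag = ladoLoopA lados rest (some true) from by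
        simp [ladoLoopA, hys, hsum, hle]]
      rw [ih (some true) (fun x hx => hmem x (by simp [hx]))]
      simp only [List.all_cons, hle, decide_true, Bool.true_and, List.isEmpty_cons]
      split_ifs <;> simp_all
    · simp [ladoLoopA, hys, hsum, hle]

-- ===== VERDICT (by name: the statement is the Claim_ definition above) =====
theorem lado_triangulo_spec : Claim_equal_lado_triangulo := by
  intro lados _ hpre
  have hpre' : lados ≠ [] := hpre
  unfold Spec_lado_triangulo lado_triangulo lado_triangulo_alt
  rw [ladoLoopA_eq lados lados none (fun _ hx => hx)]
  have hne : lados.isEmpty = false := by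
    simp [List.isEmpty_iff]; exact hpre'
  cases h : lados.all (fun l => decide (l ≤ lados.sum - l)) <;> simp [h, hne]
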